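-- pv_equiv track=rewrite | github.com/Tavini2002/HECSense_Smart-Monitoring-and-Repelling-System-for-Elephant-Intrusions | research/ai-app/elephant-aggression-detection.py | get_movement_toward_camera
-- ===== SOURCE A (Python) =====
-- def get_movement_toward_camera(bbox_sizes):
--     """Detect if elephant is moving toward camera (bbox getting larger)"""
--     if len(bbox_sizes) < 3:
--         return False
--
--     # Calculate average size change rate
--     recent_sizes = list(bbox_sizes)[-5:] if len(bbox_sizes) >= 5 else list(bbox_sizes)
--     if len(recent_sizes) < 2:
--         return False
--
--     # Calculate trend (increasing size = moving closer)
--     size_diffs = [recent_sizes[i] - recent_sizes[i-1] for i in range(1, len(recent_sizes))]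
--     avg_growth = sum(size_diffs) / len(size_diffs)
--
--     # Significant growth indicates charging toward camera
--     return avg_growth > 10  # pixels per frame threshold
-- ===== SOURCE B (Python) =====
-- def get_movement_toward_camera(bbox_sizes):
--     """Detect if elephant is moving toward camera (bbox getting larger)"""
--     n = len(bbox_sizes)
--     if n < 3:
--         return False
--     k = min(n, 5)  # window size, always >= 3
--     # average growth over the window > 10  <=>  total growth > 10 * (k - 1)
--     return bbox_sizes[-1] - bbox_sizes[-k] > 10 * (k - 1)
-- ===== Notes on version B (the rewrite author's own statement) =====
-- stated objective: simpler
-- what changed: Replaces building the list of consecutive differences and averaging it with the telescoping closed form: compares last-minus-first of the 5-element window against 10*(window-1), no intermediate list and no division.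
import Mathlib
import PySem

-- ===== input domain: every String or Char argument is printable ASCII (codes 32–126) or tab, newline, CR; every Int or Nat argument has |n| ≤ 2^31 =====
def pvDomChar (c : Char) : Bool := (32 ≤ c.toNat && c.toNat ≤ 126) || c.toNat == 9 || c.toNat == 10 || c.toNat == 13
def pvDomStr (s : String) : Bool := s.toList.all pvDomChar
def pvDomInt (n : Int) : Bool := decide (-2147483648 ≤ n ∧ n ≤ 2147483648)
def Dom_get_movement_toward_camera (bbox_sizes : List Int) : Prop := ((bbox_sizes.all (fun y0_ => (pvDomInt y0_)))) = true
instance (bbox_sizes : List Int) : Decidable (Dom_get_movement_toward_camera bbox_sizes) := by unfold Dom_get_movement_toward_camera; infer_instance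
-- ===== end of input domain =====

-- B replaces the consecutive-differences list and its average with the telescoping
-- closed form (window growth vs 10*(window-1)): simpler, no intermediate list, no division.

-- ===== PORT A =====
-- Indices i and i-1 of the comprehension are always in range, so pyGetD is exact here.
-- 'sum/len > 10' on integer diffs is ported exactly as 'sum > 10*len' (len > 0).
def get_movement_toward_camera (bbox_sizes : List Int) : Bool :=
  if bbox_sizes.length < 3 then false
  else
    let recent_sizes :=
      if bbox_sizes.length ≥ 5 then PySem.List.slice bbox_sizes (some (-5)) none
      else bbox_sizes
    if recent_sizes.length < 2 then false
    else
      let size_diffs :=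
        (PySem.List.pyRange 1 (recent_sizes.length : Int) 1).map
          (fun i => PySem.List.pyGetD recent_sizes i 0 - PySem.List.pyGetD recent_sizes (i - 1) 0)
      decide ((10 : Int) * size_diffs.length < size_diffs.sum)

-- ===== PORT B =====
def get_movement_toward_camera_alt (bbox_sizes : List Int) : Bool :=
  let n := bbox_sizes.length
  if n < 3 then false
  else
    let k := min n 5
    decide ((10 : Int) * ((k : Int) - 1) <
      PySem.List.pyGetD bbox_sizes (-1) 0 - PySem.List.pyGetD bbox_sizes (-(k : Int)) 0)

-- ===== PRECONDITION & SPEC =====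
def Spec_get_movement_toward_camera (bbox_sizes : List Int) (out : Bool) : Prop := out = get_movement_toward_camera_alt bbox_sizes
instance (bbox_sizes : List Int) (out : Bool) : Decidable (Spec_get_movement_toward_camera bbox_sizes out) := by unfold Spec_get_movement_toward_camera; infer_instance

-- ===== CLAIM (what is proved, stated in full; the proofs are below) =====
def Claim_equal_get_movement_toward_camera : Prop := ∀ (bbox_sizes : List Int), Dom_get_movement_toward_camera bbox_sizes → Spec_get_movement_toward_camera bbox_sizes (get_movement_toward_camera bbox_sizes)

-- ===== LEMMAS AND PROOFS =====

-- Telescoping: the sum of consecutive differences over indices 1..m-1 is last-of-window minus first.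
theorem telescope_sum (r : List Int) (m : Nat) (h1 : 1 ≤ m) (hm : m ≤ r.length) :
    ((PySem.List.pyRange 1 (m : Int) 1).map
      (fun i => PySem.List.pyGetD r i 0 - PySem.List.pyGetD r (i - 1) 0)).sum
    = PySem.List.pyGetD r ((m : Int) - 1) 0 - PySem.List.pyGetD r 0 0 := by
  induction m with
  | zero => omega
  | succ m ih =>
    by_cases hm1 : 1 ≤ m
    · have hsplit : PySem.List.pyRange 1 ((m + 1 : Nat) : Int) 1
          = PySem.List.pyRange 1 (m : Int) 1 ++ [(m : Int)] := by
        push_cast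
        exact PySem.List.pyRange_one_succ_right (by omega)
      rw [hsplit, List.map_append, List.sum_append, ih hm1 (by omega)]
      simp only [List.map_cons, List.map_nil, List.sum_cons, List.sum_nil]
      have : ((m + 1 : Nat) : Int) - 1 = (m : Int) := by push_cast; ring
      rw [this]
      ring_nf
    · have : m = 0 := by omega
      subst this
      simp [PySem.List.pyRange_one_eq_nil]

theorem get_movement_toward_camera_spec : Claim_equal_get_movement_toward_camera := by
  intro xs _
  unfold Spec_get_movement_toward_camera get_movement_toward_camera get_movement_toward_camera_alt
  by_cases h3 : xs.length < 3
  · simp [h3]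
  · simp only [h3, if_false]
    have hrec : (if xs.length ≥ 5 then PySem.List.slice xs (some (-5)) none else xs)
        = xs.drop (xs.length - 5) := by
      by_cases h5 : xs.length ≥ 5
      · simp only [h5, if_true]
        exact PySem.List.slice_from_neg_ofNat xs 5 (by omega)
      · simp only [h5, if_false]
        have h0 : xs.length - 5 = 0 := by omega
        simp [h0]
    simp only [hrec]
    set r := xs.drop (xs.length - 5) with hr
    have hk : min xs.length 5 = r.length := by
      simp [hr, List.length_drop]; omega
    have hlen : r.length = min xs.length 5 := hk.symm
    have hm2 : 2 ≤ r.length := by omega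
    have hnotlt : ¬ r.length < 2 := by omega
    simp only [hnotlt, if_false]
    have hx0 : xs ≠ [] := by intro h; rw [h] at h3; simp at h3
    have hsum := telescope_sum r r.length (by omega) (le_refl _)
    have hlenmap :
        ((PySem.List.pyRange 1 (r.length : Int) 1).map
          (fun i => PySem.List.pyGetD r i 0 - PySem.List.pyGetD r (i - 1) 0)).length
        = r.length - 1 := by
      simp [PySem.List.length_pyRange_one]
    -- A's window endpoints, as indices of xs
    have hrlast : PySem.List.pyGetD r ((r.length : Int) - 1) 0 = xs[xs.length - 1]'(by omega) := by
      rw [PySem.List.pyGetD_eq_getElem r 0 (by omega) (by omega)]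
      simp only [hr, List.getElem_drop, List.length_drop]
      congr 1
      omega
    have hrfirst : PySem.List.pyGetD r 0 0 = xs[xs.length - min xs.length 5]'(by omega) := by
      rw [PySem.List.pyGetD_eq_getElem r 0 (by omega) (by omega)]
      simp only [hr, List.getElem_drop]
      congr 1
      omega
    -- B's endpoints
    have hb1 : PySem.List.pyGetD xs (-1) 0 = xs[xs.length - 1]'(by omega) := by
      rw [PySem.List.pyGetD_neg_one xs 0 hx0, List.getLast_eq_getElem]
    have hbk : PySem.List.pyGetD xs (-((min xs.length 5 : Nat) : Int)) 0
        = xs[xs.length - min xs.length 5]'(by omega) :=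
      PySem.List.pyGetD_neg_natCast xs (min xs.length 5) 0 (by omega) (by omega)
    rw [hlenmap, hsum, hrlast, hrfirst, hb1, hbk, decide_eq_decide]
    omega
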